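-- pv_equiv track=rewrite | github.com/Al3ksanderD/codewars_challenges | PA/PA.py | get_albums_by_genre
-- ===== SOURCE A (Python) =====
-- def get_albums_by_genre(albums, genre):
--     genres = []
--     music_by_genre_list = []
--     for lines in albums:
--         genres.append(lines[3])
--     if genre not in genres:
--         raise ValueError("Genre not present in list")
--
--     for lines in albums:
--         if lines[3] == genre:
--             music_by_genre_list.append(lines)
--
--
--
--     """
--     Get albums by genre
--
--     :param list albums: albums' data
--     :param str genre: genre to filter by
--
--     :raises ValueError: if given genre is not present in the list. Error message: 'Genre not present in list'
--     :returns: all albums of given genre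
--     :rtype: list
--     """
--     return music_by_genre_list
-- ===== SOURCE B (Python) =====
-- def get_albums_by_genre(albums, genre):
--     music_by_genre_list = [lines for lines in albums if lines[3] == genre]
--     if not music_by_genre_list:
--         raise ValueError("Genre not present in list")
--     return music_by_genre_list
-- ===== Notes on version B (the rewrite author's own statement) =====
-- stated objective: simpler
-- what changed: Replaces A's two passes (build a genre list, membership test, then filter) with one filtering comprehension plus an emptiness check, which is equivalent since a match exists iff the filtered list is non-empty.
import Mathlib
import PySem

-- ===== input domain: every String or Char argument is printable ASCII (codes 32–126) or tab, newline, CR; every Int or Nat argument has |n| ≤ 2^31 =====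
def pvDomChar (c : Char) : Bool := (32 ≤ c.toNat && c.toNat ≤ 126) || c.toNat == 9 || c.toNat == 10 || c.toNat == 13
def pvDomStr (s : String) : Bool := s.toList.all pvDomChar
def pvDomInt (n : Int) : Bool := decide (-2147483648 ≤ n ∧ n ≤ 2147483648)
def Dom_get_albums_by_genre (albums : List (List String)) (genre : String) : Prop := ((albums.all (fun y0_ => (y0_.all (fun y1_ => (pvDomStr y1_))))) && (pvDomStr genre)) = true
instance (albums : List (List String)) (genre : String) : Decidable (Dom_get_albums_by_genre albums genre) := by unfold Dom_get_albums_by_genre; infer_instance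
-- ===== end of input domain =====

-- B replaces A's two passes (genre list + membership test, then filter) with a single
-- filtering pass and an emptiness check (objective: simpler).


-- ===== PORT A =====
-- 'lines[3]' raises IndexError on short rows; pyGet? = none there (outside Pre_, defaulted).
def get_albums_by_genre (albums : List (List String)) (genre : String) : List (List String) :=
  let genres := albums.foldl (fun acc lines => acc ++ [(PySem.List.pyGet? lines 3).getD ""]) []
  if genre ∈ genres then
    albums.foldl (fun acc lines =>
      if (PySem.List.pyGet? lines 3).getD "" = genre then acc ++ [lines] else acc) []
  else []  -- Python: raise ValueError (outside Pre_)

-- ===== PORT B =====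
def get_albums_by_genre_alt (albums : List (List String)) (genre : String) : List (List String) :=
  let music_by_genre_list := albums.filter (fun lines => (PySem.List.pyGet? lines 3).getD "" = genre)
  if music_by_genre_list.isEmpty then []  -- Python: raise ValueError (outside Pre_)
  else music_by_genre_list

-- ===== PRECONDITION & SPEC =====
-- Pre_ excludes exactly the inputs where A raises: a row shorter than 4 (IndexError)
-- or no row whose index-3 entry equals genre (ValueError).
def Pre_get_albums_by_genre (albums : List (List String)) (genre : String) : Prop :=
  (∀ l ∈ albums, 4 ≤ l.length) ∧ ∃ l ∈ albums, l.getD 3 "" = genre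
instance (albums : List (List String)) (genre : String) : Decidable (Pre_get_albums_by_genre albums genre) := by unfold Pre_get_albums_by_genre; infer_instance
def pvWitness_get_albums_by_genre : List (List String) × String :=
  ([["a", "b", "c", "rock"], ["d", "e", "f", "jazz"]], "rock")
def Spec_get_albums_by_genre (albums : List (List String)) (genre : String) (out : List (List String)) : Prop := out = get_albums_by_genre_alt albums genre
instance (albums : List (List String)) (genre : String) (out : List (List String)) : Decidable (Spec_get_albums_by_genre albums genre out) := by unfold Spec_get_albums_by_genre; infer_instance

-- ===== CLAIM (what is proved, stated in full; the proofs are below) =====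
def Claim_equal_get_albums_by_genre : Prop := ∀ (albums : List (List String)) (genre : String), Dom_get_albums_by_genre albums genre → Pre_get_albums_by_genre albums genre → Spec_get_albums_by_genre albums genre (get_albums_by_genre albums genre)

-- ===== LEMMAS AND PROOFS =====

theorem key3 {l : List String} (h : 4 ≤ l.length) :
    (PySem.List.pyGet? l 3).getD "" = l.getD 3 "" := by
  have h3 : 3 < l.length := by omega
  simp [PySem.List.pyGet?, PySem.List.pyIdx?, h3, List.getD]

-- ===== VERDICT (by name: the statement is the Claim_ definition above) =====
theorem get_albums_by_genre_spec : Claim_equal_get_albums_by_genre := by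
  intro albums genre _ hpre
  obtain ⟨hlen, l0, hl0, hg0⟩ := hpre
  unfold Spec_get_albums_by_genre get_albums_by_genre get_albums_by_genre_alt
  simp only [PySem.List.foldl_append_singleton_eq_map, PySem.List.foldl_append_ite_eq_filter,
    List.nil_append]
  have hmem : genre ∈ albums.map (fun lines => (PySem.List.pyGet? lines 3).getD "") := by
    exact List.mem_map.mpr ⟨l0, hl0, by rw [key3 (hlen l0 hl0)]; exact hg0⟩
  have hne : albums.filter (fun lines =>
      decide ((PySem.List.pyGet? lines 3).getD "" = genre)) ≠ [] := by
    intro hnil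
    have : l0 ∈ albums.filter (fun lines =>
        decide ((PySem.List.pyGet? lines 3).getD "" = genre)) := by
      rw [List.mem_filter]
      exact ⟨hl0, by rw [decide_eq_true_eq, key3 (hlen l0 hl0)]; exact hg0⟩
    rw [hnil] at this; exact absurd this (List.not_mem_nil)
  rw [if_pos hmem, if_neg (by simpa [List.isEmpty_iff] using hne)]
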